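-- pv_equiv track=rewrite | github.com/Schroters/Learning-project | Codewars/Moves in squared strings 1.py | vert_mirror
-- ===== SOURCE A (Python) =====
-- def vert_mirror(s):
--     s = s.split('\n')
--     new_list = []
--     new_s = ''
--     for i in range(len(s)):
--         new_list += [s[i][::-1]]
--         new_s = '\n'.join(new_list)
--     return new_s
-- ===== SOURCE B (Python) =====
-- def vert_mirror(s):
--     # Reverse the whole string once: this flips both the characters within
--     # each line and the order of the lines; undo the line-order flip.
--     return '\n'.join(s[::-1].split('\n')[::-1])
-- ===== Notes on version B (the rewrite author's own statement) =====
-- stated objective: faster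
-- what changed: Replaces the per-line index loop that re-joins the whole list on every iteration with a single global string reversal followed by one split and one line-order reversal, using the identity that reversing the whole string reverses each line and the line order at once.
import Mathlib
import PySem

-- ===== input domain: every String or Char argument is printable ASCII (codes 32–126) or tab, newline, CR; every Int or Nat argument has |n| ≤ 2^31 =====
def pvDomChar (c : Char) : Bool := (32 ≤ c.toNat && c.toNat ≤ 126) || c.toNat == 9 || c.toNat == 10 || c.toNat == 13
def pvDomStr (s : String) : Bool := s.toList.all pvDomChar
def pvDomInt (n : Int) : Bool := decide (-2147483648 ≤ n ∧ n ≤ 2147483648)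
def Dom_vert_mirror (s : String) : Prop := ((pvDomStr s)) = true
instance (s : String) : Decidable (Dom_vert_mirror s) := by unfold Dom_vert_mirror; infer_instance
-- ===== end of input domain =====

-- B reverses the whole string once and then the line order, instead of A's index loop
-- that re-joins the whole list on every iteration (claimed: faster, same value).

-- ===== PORT A =====
def vert_mirror (s : String) : String :=
  let parts : List String := (PySem.Str.split? s "\n").getD []   -- sep "\n" ≠ "": split? is some (exact)
  let st := (PySem.List.pyRange 0 parts.length 1).foldl
    (fun (st : List String × String) i =>
      let line := PySem.List.pyGetD parts i ""                   -- i ∈ range(len(parts)): always in range (exact)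
      let rev := (PySem.Str.slice? line none none (-1)).getD ""  -- step -1 ≠ 0: slice? is some (exact)
      let nl := st.1 ++ [rev]
      (nl, PySem.Str.join "\n" nl))
    (([] : List String), "")
  st.2

-- ===== PORT B =====
def vert_mirror_alt (s : String) : String :=
  let r := (PySem.Str.slice? s none none (-1)).getD ""           -- s[::-1], step -1 ≠ 0 (exact)
  let lines := (PySem.Str.split? r "\n").getD []                 -- sep "\n" ≠ "" (exact)
  PySem.Str.join "\n" ((PySem.List.slice? lines none none (-1)).getD [])  -- [::-1] on the list (exact)

-- ===== PRECONDITION & SPEC =====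
def Spec_vert_mirror (s : String) (out : String) : Prop := out = vert_mirror_alt s
instance (s : String) (out : String) : Decidable (Spec_vert_mirror s out) := by unfold Spec_vert_mirror; infer_instance

-- ===== CLAIM (what is proved, stated in full; the proofs are below) =====
def Claim_equal_vert_mirror : Prop := ∀ (s : String), Dom_vert_mirror s → Spec_vert_mirror s (vert_mirror s)

-- ===== LEMMAS AND PROOFS =====

-- PySem's fuel-based single-character split agrees with Mathlib's List.splitOn.
theorem pv_splitOn_go_eq (c : Char) : ∀ (fuel : Nat) (l cur : List Char) (acc : List (List Char)), l.length ≤ fuel →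
    PySem.Chars.splitOn.go [c] fuel l cur acc = acc.reverse ++ List.splitOnP.go (· == c) l cur := by
  intro fuel
  induction fuel with
  | zero =>
    intro l cur acc h
    have hl : l = [] := List.eq_nil_of_length_eq_zero (Nat.le_zero.mp h)
    subst hl
    simp [PySem.Chars.splitOn.go, List.splitOnP.go]
  | succ n ih =>
    intro l cur acc h
    cases l with
    | nil => simp [PySem.Chars.splitOn.go, List.splitOnP.go]
    | cons a t =>
      by_cases hca : c = a
      · subst hca
        have hpre : [c].isPrefixOf (c :: t) = true := by simp [List.isPrefixOf]
        simp only [PySem.Chars.splitOn.go, hpre, if_pos, List.splitOnP.go]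
        rw [ih _ _ _ (by simpa using Nat.lt_succ_iff.mp (by simpa using h))]
        simp
      · have hpre : [c].isPrefixOf (a :: t) = false := by
          simp [List.isPrefixOf, hca]
        simp only [PySem.Chars.splitOn.go, hpre, List.splitOnP.go,
          Bool.false_eq_true, if_false,
          show (a == c) = false by simp [Ne.symm hca]]
        exact ih _ _ _ (by simpa using Nat.lt_succ_iff.mp (by simpa using h))

theorem pv_chars_splitOn_eq (c : Char) (l : List Char) :
    PySem.Chars.splitOn l [c] = List.splitOn c l := by
  have := pv_splitOn_go_eq c (l.length + 1) l [] [] (by omega)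
  simpa [PySem.Chars.splitOn, List.splitOn, List.splitOnP] using this

theorem pv_splitOnP_go_ne_nil {α : Type} (P : α → Bool) :
    ∀ (l acc : List α), List.splitOnP.go P l acc ≠ [] := by
  intro l
  induction l with
  | nil => intro acc; simp [List.splitOnP.go]
  | cons a t ih =>
    intro acc
    by_cases h : P a = true
    · simp [List.splitOnP.go, h]
    · simp only [List.splitOnP.go, h, Bool.false_eq_true, if_false]
      exact ih _

theorem pv_not_mem_splitOn_go (c : Char) :
    ∀ (l acc : List Char), c ∉ acc → ∀ q ∈ List.splitOnP.go (· == c) l acc, c ∉ q := by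
  intro l
  induction l with
  | nil =>
    intro acc hacc q hq
    simp only [List.splitOnP.go, List.mem_singleton] at hq
    subst hq; simpa using hacc
  | cons a t ih =>
    intro acc hacc q hq
    by_cases h : a = c
    · subst h
      simp only [List.splitOnP.go, BEq.rfl, if_pos, List.mem_cons] at hq
      rcases hq with hq | hq
      · subst hq; simpa using hacc
      · exact ih [] (by simp) q hq
    · simp only [List.splitOnP.go, show (a == c) = false by simp [h],
        Bool.false_eq_true, if_false] at hq
      exact ih (a :: acc) (by simp [hacc, Ne.symm h]) q hq

theorem pv_inter_snoc (c : Char) : ∀ (ps : List (List Char)) (z : List Char), ps ≠ [] →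
    [c].intercalate (ps ++ [z]) = [c].intercalate ps ++ c :: z := by
  intro ps
  induction ps with
  | nil => intro z h; exact absurd rfl h
  | cons p rest ih =>
    intro z _
    cases rest with
    | nil => simp [List.intercalate]
    | cons q rest' =>
      have := ih z (by simp)
      simp only [List.cons_append]
      simp [List.intercalate] at this ⊢
      simp [this]

theorem pv_inter_rev (c : Char) : ∀ (ps : List (List Char)),
    ([c].intercalate ps).reverse = [c].intercalate ((ps.map List.reverse).reverse) := by
  intro ps
  induction ps with
  | nil => simp [List.intercalate]
  | cons p rest ih =>
    cases rest with
    | nil => simp [List.intercalate]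
    | cons q rest' =>
      have hsnoc := pv_inter_snoc c (((q :: rest').map List.reverse).reverse) p.reverse (by simp)
      calc ([c].intercalate (p :: q :: rest')).reverse
          = ([c].intercalate (q :: rest')).reverse ++ c :: p.reverse := by
            simp [List.intercalate]
        _ = [c].intercalate (((q :: rest').map List.reverse).reverse) ++ c :: p.reverse := by rw [ih]
        _ = [c].intercalate (((q :: rest').map List.reverse).reverse ++ [p.reverse]) := hsnoc.symm
        _ = [c].intercalate (((p :: q :: rest').map List.reverse).reverse) := by simp

-- the key identity: splitting the reversed string reverses each part and the part order
theorem pv_splitOn_reverse (c : Char) (l : List Char) :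
    List.splitOn c l.reverse = ((List.splitOn c l).map List.reverse).reverse := by
  have hne : List.splitOn c l ≠ [] := by
    simpa [List.splitOn, List.splitOnP] using pv_splitOnP_go_ne_nil (· == c) l []
  have hmem : ∀ q ∈ ((List.splitOn c l).map List.reverse).reverse, c ∉ q := by
    intro q hq
    simp only [List.mem_reverse, List.mem_map] at hq
    obtain ⟨p, hp, rfl⟩ := hq
    have := pv_not_mem_splitOn_go c l [] (by simp) p
      (by simpa [List.splitOn, List.splitOnP] using hp)
    simpa using this
  have h1 : l.reverse = [c].intercalate (((List.splitOn c l).map List.reverse).reverse) := by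
    conv_lhs => rw [← List.intercalate_splitOn l c]
    exact pv_inter_rev c (List.splitOn c l)
  rw [h1]
  exact List.splitOn_intercalate _ c hmem (by simpa using hne)

-- A's loop computes the join of the reversed lines
theorem pv_loop_eval (parts : List String) : ∀ (acc : List String) (j : String),
    (parts.foldl
      (fun (st : List String × String) line =>
        (st.1 ++ [String.ofList line.toList.reverse],
         PySem.Str.join "\n" (st.1 ++ [String.ofList line.toList.reverse]))) (acc, j)).2
    = if parts = [] then j
      else PySem.Str.join "\n" (acc ++ parts.map (fun t => String.ofList t.toList.reverse)) := by
  induction parts with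
  | nil => intro acc j; simp
  | cons p rest ih =>
    intro acc j
    simp only [List.foldl_cons]
    rw [ih]
    by_cases h : rest = []
    · subst h; simp
    · simp [h]

-- ===== VERDICT (by name: the statement is the Claim_ definition above) =====
theorem vert_mirror_spec : Claim_equal_vert_mirror := by
  intro s _
  unfold Spec_vert_mirror vert_mirror vert_mirror_alt
  have hsplit : ∀ (t : String), PySem.Str.split? t "\n" =
      some ((List.splitOn '\n' t.toList).map String.ofList) := by
    intro t
    simp [PySem.Str.split?, PySem.Chars.split?, pv_chars_splitOn_eq,
      show "\n".toList = ['\n'] from rfl]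
  simp only [hsplit, Option.getD_some, PySem.Str.slice?_none_none_neg_one,
    PySem.List.slice?_none_none_neg_one]
  rw [PySem.List.foldl_pyRange_zero_pyGetD'
    ((List.splitOn '\n' s.toList).map String.ofList) ""
    (fun (st : List String × String) line =>
      (st.1 ++ [String.ofList line.toList.reverse],
       PySem.Str.join "\n" (st.1 ++ [String.ofList line.toList.reverse]))) ([], "")]
  rw [pv_loop_eval]
  by_cases h : (List.splitOn '\n' s.toList).map String.ofList = []
  · exfalso
    have : List.splitOn '\n' s.toList ≠ [] := by
      simpa [List.splitOn, List.splitOnP] using pv_splitOnP_go_ne_nil (· == '\n') s.toList []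
    simp [List.map_eq_nil_iff] at h
    exact this h
  · simp only [h, List.nil_append]
    -- both sides are joins of the same list of reversed lines
    have hkey := pv_splitOn_reverse '\n' s.toList
    have hA : ((List.splitOn '\n' s.toList).map String.ofList).map
        (fun t => String.ofList t.toList.reverse)
        = (List.splitOn '\n' s.toList).map (fun p => String.ofList p.reverse) := by
      simp [Function.comp]
    rw [hA]
    have hB : ((List.splitOn '\n' (String.ofList s.toList.reverse).toList).map String.ofList).reverse
        = (List.splitOn '\n' s.toList).map (fun p => String.ofList p.reverse) := by
      simp only [String.toList_ofList, hkey]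
      simp [List.map_reverse, Function.comp]
    rw [hB]
    simp
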